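-- pv_equiv track=rewrite | github.com/nanyeglm/ncbi_download | endolysin_ncbi/utils/format_utils.py | parse_genbank_records
-- ===== SOURCE A (Python) =====
-- from typing import List
--
-- def parse_genbank_records(data: str) -> List[str]:
--     """解析GenBank格式数据，返回单个记录列表"""
--     records = []
--     current_record = []
--
--     for line in data.split('\n'):
--         current_record.append(line)
--         if line.strip() == '//':
--             if len(current_record) > 1:  # 确保不是空记录
--                 records.append('\n'.join(current_record))
--             current_record = []
--
--     # 处理最后一个记录（如果没有以//结尾）
--     if current_record and any(line.strip() for line in current_record):
--         records.append('\n'.join(current_record))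
--
--     return records
-- ===== SOURCE B (Python) =====
-- from typing import List
--
-- def parse_genbank_records(data: str) -> List[str]:
--     """Split GenBank data into records at '//' delimiter lines (recursive split-at-first-delimiter)."""
--     def go(lines: List[str]) -> List[str]:
--         for i, line in enumerate(lines):
--             if line.strip() == '//':
--                 head = ['\n'.join(lines[:i + 1])] if i > 0 else []
--                 return head + go(lines[i + 1:])
--         return ['\n'.join(lines)] if any(line.strip() for line in lines) else []
--     return go(data.split('\n'))
-- ===== Notes on version B (the rewrite author's own statement) =====
-- stated objective: simpler
-- what changed: A's single pass with a (records, current_record) accumulator pair is replaced by a recursive decomposition that repeatedly splits the line list at the first delimiter line, emits that chunk when it has at least one line before the delimiter, and recurses on the remainder.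
import Mathlib
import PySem

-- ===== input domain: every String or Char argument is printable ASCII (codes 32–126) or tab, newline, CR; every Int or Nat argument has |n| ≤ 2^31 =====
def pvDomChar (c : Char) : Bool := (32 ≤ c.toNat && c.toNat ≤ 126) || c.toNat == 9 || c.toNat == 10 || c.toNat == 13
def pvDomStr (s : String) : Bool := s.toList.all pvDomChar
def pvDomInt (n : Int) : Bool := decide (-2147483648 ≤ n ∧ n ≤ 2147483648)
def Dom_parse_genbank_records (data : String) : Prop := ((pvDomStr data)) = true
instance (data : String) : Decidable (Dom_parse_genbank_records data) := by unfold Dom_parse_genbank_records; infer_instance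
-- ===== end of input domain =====

-- B replaces A's line-by-line accumulator loop by a recursive split-at-first-'//'-delimiter decomposition (simpler).

-- ===== PORT A =====
-- one loop iteration of A: append the line, flush at a '//' delimiter
def pvAstep (st : List String × List String) (line : String) : List String × List String :=
  let cur := st.2 ++ [line]
  if PySem.Str.strip line == "//" then
    (if 1 < cur.length then st.1 ++ [PySem.Str.join "\n" cur] else st.1, [])
  else (st.1, cur)

def parse_genbank_records (data : String) : List String :=
  let st := ((PySem.Str.split? data "\n").getD []).foldl pvAstep ([], [])
  if !st.2.isEmpty && st.2.any (fun l => !(PySem.Str.strip l == "")) then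
    st.1 ++ [PySem.Str.join "\n" st.2]
  else st.1

-- ===== PORT B =====
-- Source B's `go`: take everything up to the first '//' line, emit, recurse on the rest
def pvBgo (lines : List String) : List String :=
  let pre := lines.takeWhile (fun l => !(PySem.Str.strip l == "//"))
  match _h : lines.dropWhile (fun l => !(PySem.Str.strip l == "//")) with
  | [] =>
      if lines.any (fun l => !(PySem.Str.strip l == "")) then [PySem.Str.join "\n" lines] else []
  | d :: rest => (if 0 < pre.length then [PySem.Str.join "\n" (pre ++ [d])] else []) ++ pvBgo rest
termination_by lines.length
decreasing_by
  have hle := List.length_dropWhile_le (p := fun l => !(PySem.Str.strip l == "//")) (l := lines)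
  rw [_h] at hle
  simp at hle
  omega

def parse_genbank_records_alt (data : String) : List String :=
  pvBgo ((PySem.Str.split? data "\n").getD [])

-- ===== PRECONDITION & SPEC =====
def Spec_parse_genbank_records (data : String) (out : List String) : Prop := out = parse_genbank_records_alt data
instance (data : String) (out : List String) : Decidable (Spec_parse_genbank_records data out) := by unfold Spec_parse_genbank_records; infer_instance

-- ===== CLAIM (what is proved, stated in full; the proofs are below) =====
def Claim_equal_parse_genbank_records : Prop := ∀ (data : String), Dom_parse_genbank_records data → Spec_parse_genbank_records data (parse_genbank_records data)

-- ===== LEMMAS AND PROOFS =====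

-- A's finalisation step, as a function of the fold state
def pvAfin (st : List String × List String) : List String :=
  if !st.2.isEmpty && st.2.any (fun l => !(PySem.Str.strip l == "")) then
    st.1 ++ [PySem.Str.join "\n" st.2]
  else st.1

lemma pvAstep_acc (recs cur : List String) (l : String) :
    pvAstep (recs, cur) l = (recs ++ (pvAstep ([], cur) l).1, (pvAstep ([], cur) l).2) := by
  unfold pvAstep
  dsimp only
  split_ifs <;> simp

-- records already emitted just accumulate on the left
lemma pvA_acc (lines : List String) (recs cur : List String) :
    lines.foldl pvAstep (recs, cur) =
      (recs ++ (lines.foldl pvAstep ([], cur)).1, (lines.foldl pvAstep ([], cur)).2) := by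
  induction lines generalizing recs cur with
  | nil => simp
  | cons l ls ih =>
    simp only [List.foldl_cons, pvAstep_acc recs cur l]
    rw [ih]
    conv_rhs =>
      rw [show pvAstep ([], cur) l = ((pvAstep ([], cur) l).1, (pvAstep ([], cur) l).2) from rfl,
        ih]
    simp

-- over delimiter-free lines A just accumulates them into current
lemma pvA_noDelim (lines : List String) (recs cur : List String)
    (h : ∀ l ∈ lines, (PySem.Str.strip l == "//") = false) :
    lines.foldl pvAstep (recs, cur) = (recs, cur ++ lines) := by
  induction lines generalizing cur with
  | nil => simp
  | cons l ls ih =>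
    have hl : (PySem.Str.strip l == "//") = false := h l (by simp)
    simp only [List.foldl_cons, pvAstep, hl, Bool.false_eq_true, if_false]
    rw [ih _ (fun x hx => h x (by simp [hx]))]
    simp

lemma pvAfin_acc (recs r cur : List String) :
    pvAfin (recs ++ r, cur) = recs ++ pvAfin (r, cur) := by
  unfold pvAfin; split <;> simp

-- the trailing-group tests agree: A's `current and any(...)` vs B's bare `any(...)`
lemma pvTail_cond (l : List String) (f : String → Bool) :
    (!l.isEmpty && l.any f) = l.any f := by
  cases l <;> simp

-- main lemma: A's loop + finalisation equals B's recursion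
lemma pvMain (lines : List String) :
    pvAfin (lines.foldl pvAstep ([], [])) = pvBgo lines := by
  have H : ∀ (n : Nat) (lines : List String), lines.length ≤ n →
      pvAfin (lines.foldl pvAstep ([], [])) = pvBgo lines := by
    intro n
    induction n with
    | zero =>
      intro lines hlen
      have : lines = [] := by
        cases lines with
        | nil => rfl
        | cons a as => simp at hlen
      subst this
      simp [pvBgo, pvAfin]
    | succ n ih =>
      intro lines hlen
      rw [pvBgo]
      set p : String → Bool := fun l => !(PySem.Str.strip l == "//") with hp
      cases hdw : lines.dropWhile p with
      | nil =>
        have hall : ∀ l ∈ lines, (PySem.Str.strip l == "//") = false := by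
          intro l hl
          have hsplit := List.takeWhile_append_dropWhile (p := p) (l := lines)
          rw [hdw, List.append_nil] at hsplit
          have : l ∈ lines.takeWhile p := by rw [hsplit]; exact hl
          have := List.mem_takeWhile_imp this
          simpa [hp] using this
        rw [pvA_noDelim lines [] [] hall]
        simp only [List.nil_append, pvAfin, pvTail_cond]
      | cons d rest =>
        have hsplit := List.takeWhile_append_dropWhile (p := p) (l := lines)
        rw [hdw] at hsplit
        set pre := lines.takeWhile p with hpre
        have hpremem : ∀ l ∈ pre, (PySem.Str.strip l == "//") = false := by
          intro l hl
          have := List.mem_takeWhile_imp (hpre ▸ hl)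
          simpa [hp] using this
        have hd : (PySem.Str.strip d == "//") = true := by
          have hne : lines.dropWhile p ≠ [] := by rw [hdw]; simp
          have := List.head_dropWhile_not p hne
          simp only [hdw, List.head_cons] at this
          simpa [hp] using this
        have hrest : rest.length ≤ n := by
          have : lines.length = pre.length + rest.length + 1 := by
            rw [← hsplit]; simp; omega
          omega
        calc pvAfin (lines.foldl pvAstep ([], []))
            = pvAfin (((pre ++ d :: rest)).foldl pvAstep ([], [])) := by rw [hsplit]
          _ = pvAfin ((d :: rest).foldl pvAstep ([], pre)) := by
              rw [List.foldl_append, pvA_noDelim pre [] [] hpremem, List.nil_append]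
          _ = pvAfin (rest.foldl pvAstep (pvAstep ([], pre) d)) := by rw [List.foldl_cons]
          _ = (if 0 < pre.length then [PySem.Str.join "\n" (pre ++ [d])] else []) ++ pvBgo rest := by
              simp only [pvAstep, hd, if_true]
              have hlen1 : (1 < (pre ++ [d]).length) ↔ (0 < pre.length) := by
                simp
              rw [pvA_acc, pvAfin_acc, ih rest hrest]
              simp only [hlen1]
              split <;> simp
  exact H lines.length lines le_rfl

-- ===== VERDICT (by name: the statement is the Claim_ definition above) =====
theorem parse_genbank_records_spec : Claim_equal_parse_genbank_records := by
  intro data _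
  unfold Spec_parse_genbank_records parse_genbank_records parse_genbank_records_alt
  exact pvMain _
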